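-- pv_equiv track=rewrite | github.com/AbelSniffel/SteamKM | Themes.py | get_theme_colors
-- ===== SOURCE A (Python) =====
-- def get_theme_colors(theme):
--     theme_to_index = {"dark": 0, "light": 1, "ocean": 2, "forest": 3, "fire": 4}
--     colors = {
--         "text_color": ("#ffffff", "#3c3c73", "#e6ffff", "#e6ffe6", "#fff5d7"),
--         "main_background": ("#252525", "#eef1ff", "#00557f", "#065242", "#1a0500"),
--         "info_window_background": ("#4b4b4b", "#becfff", "#13314b", "#316447", "#732800"),
--         "search_background": ("#565656", "#becfff", "#4181b9", "#287855", "#732800"),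
--         "label_background": ("#646464", "#a5b6ff", "#002e43", "#136c54", "#692300"),
--         "changelog_background": ("#232323", "#f5f7ff", "#18344b", "#04332a", "#120400"),
--         "groupbox_background": ("#323232", "#dce2ff", "#1f415f", "#083f33", "#3c1300"),
--         "button_background": ("#30be88", "#b4c3ff", "#40a5aa", "#3e8354", "#c33e00"),
--         "reset_button_background": ("#16a173", "#afafff", "#55557f", "#619e51", "#ff7c30"),
--         "combobox_background": ("#009d6f", "#aab1ff", "#007e82", "#4f9e00", "#d76400"),
--         "checkbox_background_checked": ("#45e09a", "#8286ff", "#00e6ff", "#6beb3c", "#ffaa00"),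
--         "checkbox_background_unchecked": ("#4f4f4f", "#bbbbf4", "#002f43", "#00281f", "#5f1d00"),
--         "bar_handle": ("#3be69f", "#8286ff", "#3bbaff", "#53c865", "#ff7700"),
--         "bar_background": ("#3d6452", "#bbbbf4", "#25789b", "#37734a", "#4d2600"),
--         "table_background": ("#232323", "#eceefd", "#203650", "#02372d", "#200a00"),
--         "table_item_selected": ("#38b677", "#99aaff", "#3c7ab3", "#3e954c", "#cc5200"),
--         "table_gridline_color": ("#3d3d3d", "#bec9ff", "#2f4962", "#144d44", "#331a00"),
--         "table_border_color": ("#383838", "#b5c1ff", "#2b5a83", "#025a4a", "#4d2600"),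
--         "border_color": ("#4d4d4d", "#8b9ffe", "#45a1c9", "#0d8e58", "#661a00"),
--     }
--     theme_index = theme_to_index.get(theme, 0)
--     return {key: value[theme_index] for key, value in colors.items()}
-- ===== SOURCE B (Python) =====
-- # Compact row-oriented palette: whitespace-packed color rows per theme, zipped with the key list.
-- _KEYS = ("text_color main_background info_window_background search_background label_background "
--          "changelog_background groupbox_background button_background reset_button_background "
--          "combobox_background checkbox_background_checked checkbox_background_unchecked "
--          "bar_handle bar_background table_background table_item_selected table_gridline_color "
--          "table_border_color border_color").split()
--
-- _ROWS = {
--     "dark":   "#ffffff #252525 #4b4b4b #565656 #646464 #232323 #323232 #30be88 #16a173 #009d6f #45e09a #4f4f4f #3be69f #3d6452 #232323 #38b677 #3d3d3d #383838 #4d4d4d".split(),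
--     "light":  "#3c3c73 #eef1ff #becfff #becfff #a5b6ff #f5f7ff #dce2ff #b4c3ff #afafff #aab1ff #8286ff #bbbbf4 #8286ff #bbbbf4 #eceefd #99aaff #bec9ff #b5c1ff #8b9ffe".split(),
--     "ocean":  "#e6ffff #00557f #13314b #4181b9 #002e43 #18344b #1f415f #40a5aa #55557f #007e82 #00e6ff #002f43 #3bbaff #25789b #203650 #3c7ab3 #2f4962 #2b5a83 #45a1c9".split(),
--     "forest": "#e6ffe6 #065242 #316447 #287855 #136c54 #04332a #083f33 #3e8354 #619e51 #4f9e00 #6beb3c #00281f #53c865 #37734a #02372d #3e954c #144d44 #025a4a #0d8e58".split(),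
--     "fire":   "#fff5d7 #1a0500 #732800 #732800 #692300 #120400 #3c1300 #c33e00 #ff7c30 #d76400 #ffaa00 #5f1d00 #ff7700 #4d2600 #200a00 #cc5200 #331a00 #4d2600 #661a00".split(),
-- }
--
--
-- def get_theme_colors(theme):
--     return dict(zip(_KEYS, _ROWS.get(theme, _ROWS["dark"])))
-- ===== Notes on version B (the rewrite author's own statement) =====
-- stated objective: alternative
-- what changed: Palette stored row-oriented as one whitespace-packed color string per theme; the function splits the looked-up row (dark default) and zips it with the key list, instead of mapping the theme to a column index and slicing that column out of per-key 5-tuples with a comprehension.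
import Mathlib
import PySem

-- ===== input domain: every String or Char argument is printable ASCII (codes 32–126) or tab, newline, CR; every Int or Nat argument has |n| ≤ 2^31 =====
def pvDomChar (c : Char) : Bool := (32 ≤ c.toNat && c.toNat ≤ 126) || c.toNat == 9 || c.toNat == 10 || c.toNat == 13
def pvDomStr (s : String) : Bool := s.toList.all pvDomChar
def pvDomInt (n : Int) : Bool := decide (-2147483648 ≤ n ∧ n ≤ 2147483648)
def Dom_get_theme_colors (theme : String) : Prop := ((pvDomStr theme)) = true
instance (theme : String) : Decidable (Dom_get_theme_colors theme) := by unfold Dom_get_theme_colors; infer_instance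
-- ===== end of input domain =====

set_option maxRecDepth 200000

-- B stores the palette row-oriented: one whitespace-packed color string per theme, split and
-- zipped with the key list, instead of A's column index + per-key tuple-slicing comprehension
-- (objective: alternative representation of the same table).

-- ===== PORT A =====
-- tuple indexing value[i] for a 5-tuple; exact for i ∈ {0,…,4}, the only values theme_index takes
def pvTuple5Get (v : String × String × String × String × String) (i : Int) : String :=
  if i = 0 then v.1 else if i = 1 then v.2.1 else if i = 2 then v.2.2.1
  else if i = 3 then v.2.2.2.1 else v.2.2.2.2

def pvThemeToIndex : PySem.Dict String Int :=
  PySem.Dict.ofList [("dark", 0), ("light", 1), ("ocean", 2), ("forest", 3), ("fire", 4)]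

def pvColors : PySem.Dict String (String × String × String × String × String) :=
  PySem.Dict.ofList [("text_color", ("#ffffff", "#3c3c73", "#e6ffff", "#e6ffe6", "#fff5d7")),
    ("main_background", ("#252525", "#eef1ff", "#00557f", "#065242", "#1a0500")),
    ("info_window_background", ("#4b4b4b", "#becfff", "#13314b", "#316447", "#732800")),
    ("search_background", ("#565656", "#becfff", "#4181b9", "#287855", "#732800")),
    ("label_background", ("#646464", "#a5b6ff", "#002e43", "#136c54", "#692300")),
    ("changelog_background", ("#232323", "#f5f7ff", "#18344b", "#04332a", "#120400")),
    ("groupbox_background", ("#323232", "#dce2ff", "#1f415f", "#083f33", "#3c1300")),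
    ("button_background", ("#30be88", "#b4c3ff", "#40a5aa", "#3e8354", "#c33e00")),
    ("reset_button_background", ("#16a173", "#afafff", "#55557f", "#619e51", "#ff7c30")),
    ("combobox_background", ("#009d6f", "#aab1ff", "#007e82", "#4f9e00", "#d76400")),
    ("checkbox_background_checked", ("#45e09a", "#8286ff", "#00e6ff", "#6beb3c", "#ffaa00")),
    ("checkbox_background_unchecked", ("#4f4f4f", "#bbbbf4", "#002f43", "#00281f", "#5f1d00")),
    ("bar_handle", ("#3be69f", "#8286ff", "#3bbaff", "#53c865", "#ff7700")),
    ("bar_background", ("#3d6452", "#bbbbf4", "#25789b", "#37734a", "#4d2600")),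
    ("table_background", ("#232323", "#eceefd", "#203650", "#02372d", "#200a00")),
    ("table_item_selected", ("#38b677", "#99aaff", "#3c7ab3", "#3e954c", "#cc5200")),
    ("table_gridline_color", ("#3d3d3d", "#bec9ff", "#2f4962", "#144d44", "#331a00")),
    ("table_border_color", ("#383838", "#b5c1ff", "#2b5a83", "#025a4a", "#4d2600")),
    ("border_color", ("#4d4d4d", "#8b9ffe", "#45a1c9", "#0d8e58", "#661a00"))]

def get_theme_colors (theme : String) : List (String × String) :=
  let theme_index := pvThemeToIndex.getD theme 0
  (pvColors.items.map (fun kv => (kv.1, pvTuple5Get kv.2 theme_index)))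

-- ===== PORT B =====
-- _KEYS = "...".split()  (the Python string concatenation is written out as one literal here)
def pvKeys : List String :=
  PySem.Str.split₀ "text_color main_background info_window_background search_background label_background changelog_background groupbox_background button_background reset_button_background combobox_background checkbox_background_checked checkbox_background_unchecked bar_handle bar_background table_background table_item_selected table_gridline_color table_border_color border_color"

def pvRowDark : List String := PySem.Str.split₀ "#ffffff #252525 #4b4b4b #565656 #646464 #232323 #323232 #30be88 #16a173 #009d6f #45e09a #4f4f4f #3be69f #3d6452 #232323 #38b677 #3d3d3d #383838 #4d4d4d"
def pvRowLight : List String := PySem.Str.split₀ "#3c3c73 #eef1ff #becfff #becfff #a5b6ff #f5f7ff #dce2ff #b4c3ff #afafff #aab1ff #8286ff #bbbbf4 #8286ff #bbbbf4 #eceefd #99aaff #bec9ff #b5c1ff #8b9ffe"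
def pvRowOcean : List String := PySem.Str.split₀ "#e6ffff #00557f #13314b #4181b9 #002e43 #18344b #1f415f #40a5aa #55557f #007e82 #00e6ff #002f43 #3bbaff #25789b #203650 #3c7ab3 #2f4962 #2b5a83 #45a1c9"
def pvRowForest : List String := PySem.Str.split₀ "#e6ffe6 #065242 #316447 #287855 #136c54 #04332a #083f33 #3e8354 #619e51 #4f9e00 #6beb3c #00281f #53c865 #37734a #02372d #3e954c #144d44 #025a4a #0d8e58"
def pvRowFire : List String := PySem.Str.split₀ "#fff5d7 #1a0500 #732800 #732800 #692300 #120400 #3c1300 #c33e00 #ff7c30 #d76400 #ffaa00 #5f1d00 #ff7700 #4d2600 #200a00 #cc5200 #331a00 #4d2600 #661a00"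

def pvRows : PySem.Dict String (List String) :=
  PySem.Dict.mk
    [("dark", pvRowDark), ("light", pvRowLight), ("ocean", pvRowOcean), ("forest", pvRowForest), ("fire", pvRowFire)]

-- dict(zip(keys, row)): keys are distinct, so as an association list this is the zip itself
def get_theme_colors_alt (theme : String) : List (String × String) :=
  List.zip pvKeys (pvRows.getD theme (pvRows.getD "dark" []))

-- ===== PRECONDITION & SPEC =====
def Spec_get_theme_colors (theme : String) (out : List (String × String)) : Prop := out = get_theme_colors_alt theme
instance (theme : String) (out : List (String × String)) : Decidable (Spec_get_theme_colors theme out) := by unfold Spec_get_theme_colors; infer_instance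

-- ===== CLAIM (what is proved, stated in full; the proofs are below) =====
def Claim_equal_get_theme_colors : Prop := ∀ (theme : String), Dom_get_theme_colors theme → Spec_get_theme_colors theme (get_theme_colors theme)

-- ===== LEMMAS AND PROOFS =====
theorem pvKeys_eval : pvKeys = ["text_color", "main_background", "info_window_background", "search_background", "label_background", "changelog_background", "groupbox_background", "button_background", "reset_button_background", "combobox_background", "checkbox_background_checked", "checkbox_background_unchecked", "bar_handle", "bar_background", "table_background", "table_item_selected", "table_gridline_color", "table_border_color", "border_color"] := by decide

theorem pvRowDark_eval : pvRowDark = ["#ffffff", "#252525", "#4b4b4b", "#565656", "#646464", "#232323", "#323232", "#30be88", "#16a173", "#009d6f", "#45e09a", "#4f4f4f", "#3be69f", "#3d6452", "#232323", "#38b677", "#3d3d3d", "#383838", "#4d4d4d"] := by decide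

theorem pvRowLight_eval : pvRowLight = ["#3c3c73", "#eef1ff", "#becfff", "#becfff", "#a5b6ff", "#f5f7ff", "#dce2ff", "#b4c3ff", "#afafff", "#aab1ff", "#8286ff", "#bbbbf4", "#8286ff", "#bbbbf4", "#eceefd", "#99aaff", "#bec9ff", "#b5c1ff", "#8b9ffe"] := by decide

theorem pvRowOcean_eval : pvRowOcean = ["#e6ffff", "#00557f", "#13314b", "#4181b9", "#002e43", "#18344b", "#1f415f", "#40a5aa", "#55557f", "#007e82", "#00e6ff", "#002f43", "#3bbaff", "#25789b", "#203650", "#3c7ab3", "#2f4962", "#2b5a83", "#45a1c9"] := by decide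

theorem pvRowForest_eval : pvRowForest = ["#e6ffe6", "#065242", "#316447", "#287855", "#136c54", "#04332a", "#083f33", "#3e8354", "#619e51", "#4f9e00", "#6beb3c", "#00281f", "#53c865", "#37734a", "#02372d", "#3e954c", "#144d44", "#025a4a", "#0d8e58"] := by decide

theorem pvRowFire_eval : pvRowFire = ["#fff5d7", "#1a0500", "#732800", "#732800", "#692300", "#120400", "#3c1300", "#c33e00", "#ff7c30", "#d76400", "#ffaa00", "#5f1d00", "#ff7700", "#4d2600", "#200a00", "#cc5200", "#331a00", "#4d2600", "#661a00"] := by decide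

theorem pv_get_dark : pvRows.get? "dark" = some pvRowDark := by
  simp [pvRows, PySem.Dict.get?_mk_cons]
theorem pv_get_light : pvRows.get? "light" = some pvRowLight := by
  simp [pvRows, PySem.Dict.get?_mk_cons]
theorem pv_get_ocean : pvRows.get? "ocean" = some pvRowOcean := by
  simp [pvRows, PySem.Dict.get?_mk_cons]
theorem pv_get_forest : pvRows.get? "forest" = some pvRowForest := by
  simp [pvRows, PySem.Dict.get?_mk_cons]
theorem pv_get_fire : pvRows.get? "fire" = some pvRowFire := by
  simp [pvRows, PySem.Dict.get?_mk_cons]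

theorem pv_main : ∀ (theme : String), Spec_get_theme_colors theme (get_theme_colors theme) := by
  intro theme
  unfold Spec_get_theme_colors get_theme_colors_alt
  simp only [PySem.Dict.getD_eq_get?_getD]
  by_cases h0 : theme = "dark"
  · subst h0; rw [pv_get_dark]; simp only [Option.getD_some]
    rw [pvKeys_eval, pvRowDark_eval]; decide
  by_cases h1 : theme = "light"
  · subst h1; rw [pv_get_light, pv_get_dark]; simp only [Option.getD_some]
    rw [pvKeys_eval, pvRowLight_eval]; decide
  by_cases h2 : theme = "ocean"
  · subst h2; rw [pv_get_ocean, pv_get_dark]; simp only [Option.getD_some]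
    rw [pvKeys_eval, pvRowOcean_eval]; decide
  by_cases h3 : theme = "forest"
  · subst h3; rw [pv_get_forest, pv_get_dark]; simp only [Option.getD_some]
    rw [pvKeys_eval, pvRowForest_eval]; decide
  by_cases h4 : theme = "fire"
  · subst h4; rw [pv_get_fire, pv_get_dark]; simp only [Option.getD_some]
    rw [pvKeys_eval, pvRowFire_eval]; decide
  have b0 : ("dark" == theme) = false := beq_eq_false_iff_ne.mpr (fun h => h0 h.symm)
  have b1 : ("light" == theme) = false := beq_eq_false_iff_ne.mpr (fun h => h1 h.symm)
  have b2 : ("ocean" == theme) = false := beq_eq_false_iff_ne.mpr (fun h => h2 h.symm)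
  have b3 : ("forest" == theme) = false := beq_eq_false_iff_ne.mpr (fun h => h3 h.symm)
  have b4 : ("fire" == theme) = false := beq_eq_false_iff_ne.mpr (fun h => h4 h.symm)
  have hn : pvRows.get? theme = none := by
    simp [pvRows, PySem.Dict.get?, b0, b1, b2, b3, b4]
  have hA : pvThemeToIndex.getD theme 0 = 0 := by
    have e : pvThemeToIndex = PySem.Dict.mk
        [("dark", 0), ("light", 1), ("ocean", 2), ("forest", 3), ("fire", 4)] := by decide
    rw [e]
    simp [PySem.Dict.getD, b0, b1, b2, b3, b4, PySem.Dict.get?]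
  rw [hn, pv_get_dark]
  simp only [Option.getD_none, Option.getD_some]
  simp only [get_theme_colors, hA]
  rw [pvKeys_eval, pvRowDark_eval]; decide

-- ===== VERDICT (by name: the statement is the Claim_ definition above) =====
theorem get_theme_colors_spec : Claim_equal_get_theme_colors := by
  intro theme _
  exact pv_main theme
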